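-- pv_equiv track=rewrite | github.com/sarakm0704/gamjet_Run3 | coffea/NanoAnalysis/NanoAODAnalysis/Hplus2taunuAnalysis/ANN/disCo.py | GetModelWeightsAndBiases
-- ===== SOURCE A (Python) =====
-- def GetModelWeightsAndBiases(nInputs, neuronsList):
--     '''
--     https://keras.io/models/about-keras-models/
--
--     returns a dictionary containing the configuration of the model.
--     The model can be reinstantiated from its config via:
--     model = Model.from_config(config)
--     '''
--     nParamsT  = 0
--     nBiasT    = 0
--     nWeightsT = 0
--
--     for i, n in enumerate(neuronsList, 0):
--         nParams = 0
--         nBias   = neuronsList[i]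
--         if i == 0:
--             nWeights = nInputs * neuronsList[i]
--         else:
--             nWeights = neuronsList[i-1] * neuronsList[i]
--         nParams += nBias + nWeights
--
--         nParamsT  += nParams
--         nWeightsT += nWeights
--         nBiasT += nBias
--     return nParamsT, nWeightsT, nBiasT
-- ===== SOURCE B (Python) =====
-- def GetModelWeightsAndBiases(nInputs, neuronsList):
--     # Divide and conquer: totals of the whole network = totals of the first
--     # half (fed by nInputs) plus totals of the second half (fed by the last
--     # layer width of the first half); componentwise addition is valid because
--     # all three totals are sums over layers.
--     if len(neuronsList) <= 1:
--         if not neuronsList: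
--             return 0, 0, 0
--         w = nInputs * neuronsList[0]
--         return neuronsList[0] + w, w, neuronsList[0]
--     m = len(neuronsList) // 2
--     p1, w1, b1 = GetModelWeightsAndBiases(nInputs, neuronsList[:m])
--     p2, w2, b2 = GetModelWeightsAndBiases(neuronsList[m - 1], neuronsList[m:])
--     return p1 + p2, w1 + w2, b1 + b2
-- ===== Notes on version B (the rewrite author's own statement) =====
-- stated objective: alternative
-- what changed: Replaces the single interleaved index loop by a divide-and-conquer recursion: split the layer list in half, total each half recursively (the right half's input width is the last layer of the left half), and add the three totals componentwise.
import Mathlib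
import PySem

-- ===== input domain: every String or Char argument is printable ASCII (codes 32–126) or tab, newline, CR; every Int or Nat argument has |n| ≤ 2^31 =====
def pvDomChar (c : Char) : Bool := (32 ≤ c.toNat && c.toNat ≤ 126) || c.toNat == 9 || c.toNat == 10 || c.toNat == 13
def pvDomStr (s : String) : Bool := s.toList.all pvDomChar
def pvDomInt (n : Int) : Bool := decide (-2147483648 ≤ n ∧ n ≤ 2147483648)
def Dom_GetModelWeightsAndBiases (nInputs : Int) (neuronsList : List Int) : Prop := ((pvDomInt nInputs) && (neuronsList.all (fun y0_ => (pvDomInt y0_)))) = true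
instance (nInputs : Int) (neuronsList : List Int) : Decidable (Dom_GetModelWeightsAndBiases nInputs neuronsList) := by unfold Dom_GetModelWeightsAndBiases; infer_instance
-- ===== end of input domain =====

-- B totals the network by divide and conquer (split the layer list in half, recurse on each
-- half, add componentwise) instead of A's single interleaved index loop; objective: alternative.

-- ===== PORT A =====
-- for i, n in enumerate(neuronsList, 0): ...   (the enumerate index is always in range,
-- so the .getD 0 default of pyGet? is never used)
def GetModelWeightsAndBiases (nInputs : Int) (neuronsList : List Int) : Int × Int × Int :=
  (PySem.List.enumerate neuronsList 0).foldl
    (fun (st : Int × Int × Int) (p : Int × Int) =>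
      let i := p.1
      let nBias := (PySem.List.pyGet? neuronsList i).getD 0
      let nWeights :=
        if i = 0 then nInputs * (PySem.List.pyGet? neuronsList i).getD 0
        else (PySem.List.pyGet? neuronsList (i - 1)).getD 0 * (PySem.List.pyGet? neuronsList i).getD 0
      let nParams := 0 + (nBias + nWeights)
      (st.1 + nParams, st.2.1 + nWeights, st.2.2 + nBias))
    (0, 0, 0)

-- ===== PORT B =====
-- the index m-1 and both slices are always in range (2 ≤ length, m = length / 2), so the
-- .getD 0 default is never used
def GetModelWeightsAndBiases_alt (nInputs : Int) (neuronsList : List Int) : Int × Int × Int :=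
  if _h : neuronsList.length ≤ 1 then
    match neuronsList with
    | [] => (0, 0, 0)
    | x :: _ =>
      let w := nInputs * x
      (x + w, w, x)
  else
    let m : Nat := neuronsList.length / 2
    let r1 := GetModelWeightsAndBiases_alt nInputs (PySem.List.slice neuronsList none (some (m : Int)))
    let carry := PySem.List.pyGetD neuronsList ((m : Int) - 1) 0
    let r2 := GetModelWeightsAndBiases_alt carry (PySem.List.slice neuronsList (some (m : Int)) none)
    (r1.1 + r2.1, r1.2.1 + r2.2.1, r1.2.2 + r2.2.2)
termination_by neuronsList.length
decreasing_by
  · simp only [PySem.List.slice_to_natCast, List.length_take]; omega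
  · simp only [PySem.List.slice_from_natCast, List.length_drop]; omega

-- ===== PRECONDITION & SPEC =====
def Spec_GetModelWeightsAndBiases (nInputs : Int) (neuronsList : List Int) (out : Int × Int × Int) : Prop := out = GetModelWeightsAndBiases_alt nInputs neuronsList
instance (nInputs : Int) (neuronsList : List Int) (out : Int × Int × Int) : Decidable (Spec_GetModelWeightsAndBiases nInputs neuronsList out) := by unfold Spec_GetModelWeightsAndBiases; infer_instance

-- ===== CLAIM (what is proved, stated in full; the proofs are below) =====
def Claim_equal_GetModelWeightsAndBiases : Prop := ∀ (nInputs : Int) (neuronsList : List Int), Dom_GetModelWeightsAndBiases nInputs neuronsList → Spec_GetModelWeightsAndBiases nInputs neuronsList (GetModelWeightsAndBiases nInputs neuronsList)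

-- ===== LEMMAS AND PROOFS =====

-- closed form both ports are proved equal to: biases = sum, weights = chained products
def pvS (nI : Int) (ns : List Int) : Int × Int × Int :=
  let b := ns.sum
  let w := (((nI :: ns).zip ns).map (fun p => p.1 * p.2)).sum
  (w + b, w, b)

theorem pvS_nil (nI : Int) : pvS nI [] = (0, 0, 0) := by simp [pvS]

theorem pvS_cons (nI x : Int) (xs : List Int) :
    pvS nI (x :: xs) =
      ((pvS x xs).1 + (x + nI * x), (pvS x xs).2.1 + nI * x, (pvS x xs).2.2 + x) := by
  simp only [pvS, List.zip_cons_cons, List.map_cons, List.sum_cons, Prod.ext_iff]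
  refine ⟨by ring, by ring, by ring⟩

theorem pvS_append (xs : List Int) : ∀ (nI : Int) (ys : List Int),
    pvS nI (xs ++ ys) =
      ((pvS nI xs).1 + (pvS (xs.getLastD nI) ys).1,
       (pvS nI xs).2.1 + (pvS (xs.getLastD nI) ys).2.1,
       (pvS nI xs).2.2 + (pvS (xs.getLastD nI) ys).2.2) := by
  induction xs with
  | nil => intro nI ys; simp [pvS_nil]
  | cons x xs ih =>
    intro nI ys
    rw [List.cons_append, pvS_cons, ih x ys, pvS_cons, List.getLastD_cons]
    simp only [Prod.ext_iff]
    refine ⟨by ring, by ring, by ring⟩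

-- the per-element contributions of A's loop body, with lookups into ns
def pvV (nInputs : Int) (ns : List Int) (p : Int × Int) : Int :=
  if p.1 = 0 then nInputs * (PySem.List.pyGet? ns p.1).getD 0
  else (PySem.List.pyGet? ns (p.1 - 1)).getD 0 * (PySem.List.pyGet? ns p.1).getD 0

def pvW (ns : List Int) (p : Int × Int) : Int := (PySem.List.pyGet? ns p.1).getD 0

def pvU (nInputs : Int) (ns : List Int) (p : Int × Int) : Int :=
  pvW ns p + pvV nInputs ns p

-- A's fold is the triple of sums of the three contribution functions
theorem pvFold_eq_sums (nInputs : Int) (ns : List Int) (l : List (Int × Int)) (st : Int × Int × Int) :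
    l.foldl
      (fun (st : Int × Int × Int) (p : Int × Int) =>
        let i := p.1
        let nBias := (PySem.List.pyGet? ns i).getD 0
        let nWeights :=
          if i = 0 then nInputs * (PySem.List.pyGet? ns i).getD 0
          else (PySem.List.pyGet? ns (i - 1)).getD 0 * (PySem.List.pyGet? ns i).getD 0
        let nParams := 0 + (nBias + nWeights)
        (st.1 + nParams, st.2.1 + nWeights, st.2.2 + nBias)) st
    = (st.1 + (l.map (pvU nInputs ns)).sum, st.2.1 + (l.map (pvV nInputs ns)).sum,
       st.2.2 + (l.map (pvW ns)).sum) := by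
  induction l generalizing st with
  | nil => simp
  | cons p l ih =>
    simp only [List.foldl_cons, List.map_cons, List.sum_cons, ih, pvU, pvV, pvW, Prod.ext_iff]
    refine ⟨by ring, by ring, by ring⟩

theorem pvEnumerate_shift (ns : List Int) (s : Int) :
    PySem.List.enumerate ns (s + 1) =
      (PySem.List.enumerate ns s).map (fun p => (p.1 + 1, p.2)) := by
  induction ns generalizing s with
  | nil => simp [PySem.List.enumerate_nil]
  | cons x xs ih => simp [PySem.List.enumerate_cons, ih]

theorem pvV_shift (nInputs x : Int) (xs : List Int) :
    ∀ p ∈ PySem.List.enumerate xs 0,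
      pvV nInputs (x :: xs) (p.1 + 1, p.2) = pvV x xs p := by
  intro p hp
  rcases (PySem.List.mem_enumerate_iff _ _ _).1 hp with ⟨k, hk, rfl⟩
  simp only [pvV]
  have h1 : ((0 : Int) + k + 1) = ((k + 1 : Nat) : Int) := by omega
  have h0 : ((0 : Int) + k) = ((k : Nat) : Int) := by omega
  have h2 : ((k + 1 : Nat) : Int) - 1 = ((k : Nat) : Int) := by omega
  rw [h1, h2, h0]
  simp only [PySem.List.pyGet?_natCast, List.getElem?_cons_succ]
  have hne1 : ((k + 1 : Nat) : Int) ≠ 0 := by positivity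
  rw [if_neg hne1]
  cases k with
  | zero => simp
  | succ m =>
    have hne0 : ((m + 1 : Nat) : Int) ≠ 0 := by positivity
    rw [if_neg hne0]
    have hkk : ((m + 1 : Nat) : Int) - 1 = ((m : Nat) : Int) := by omega
    rw [hkk]
    simp [PySem.List.pyGet?_natCast]

theorem pvW_shift (x : Int) (xs : List Int) :
    ∀ p ∈ PySem.List.enumerate xs 0,
      pvW (x :: xs) (p.1 + 1, p.2) = pvW xs p := by
  intro p hp
  rcases (PySem.List.mem_enumerate_iff _ _ _).1 hp with ⟨k, hk, rfl⟩
  simp only [pvW]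
  have h1 : ((0 : Int) + k + 1) = ((k + 1 : Nat) : Int) := by omega
  have h0 : ((0 : Int) + k) = ((k : Nat) : Int) := by omega
  rw [h1, h0]
  simp [PySem.List.pyGet?_natCast]

-- A satisfies the layer-peeling recursion
theorem pvA_cons (nInputs x : Int) (xs : List Int) :
    GetModelWeightsAndBiases nInputs (x :: xs) =
      ((GetModelWeightsAndBiases x xs).1 + (x + nInputs * x),
       (GetModelWeightsAndBiases x xs).2.1 + nInputs * x,
       (GetModelWeightsAndBiases x xs).2.2 + x) := by
  unfold GetModelWeightsAndBiases
  rw [PySem.List.enumerate_cons]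
  rw [pvFold_eq_sums, pvFold_eq_sums]
  rw [pvEnumerate_shift xs 0]
  rw [List.map_cons, List.map_cons, List.map_cons, List.map_map, List.map_map, List.map_map]
  have hV : List.map ((pvV nInputs (x :: xs)) ∘ (fun p : Int × Int => (p.1 + 1, p.2)))
      (PySem.List.enumerate xs 0) = List.map (pvV x xs) (PySem.List.enumerate xs 0) :=
    List.map_congr_left (fun p hp => pvV_shift nInputs x xs p hp)
  have hW : List.map ((pvW (x :: xs)) ∘ (fun p : Int × Int => (p.1 + 1, p.2)))
      (PySem.List.enumerate xs 0) = List.map (pvW xs) (PySem.List.enumerate xs 0) :=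
    List.map_congr_left (fun p hp => pvW_shift x xs p hp)
  have hU : List.map ((pvU nInputs (x :: xs)) ∘ (fun p : Int × Int => (p.1 + 1, p.2)))
      (PySem.List.enumerate xs 0) = List.map (pvU x xs) (PySem.List.enumerate xs 0) := by
    refine List.map_congr_left (fun p hp => ?_)
    simp only [Function.comp, pvU]
    rw [pvV_shift nInputs x xs p hp, pvW_shift x xs p hp]
  rw [hV, hW, hU]
  have hx : (PySem.List.pyGet? (x :: xs) (0 : Int)).getD 0 = x := by
    simp [PySem.List.pyGet?, PySem.List.pyIdx?]
  simp only [pvU, pvV, pvW, hx, List.sum_cons, Prod.ext_iff]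
  refine ⟨?_, ?_, ?_⟩ <;> simp <;> ring

-- A equals the closed form
theorem pvA_eq_S (nInputs : Int) (ns : List Int) :
    GetModelWeightsAndBiases nInputs ns = pvS nInputs ns := by
  induction ns generalizing nInputs with
  | nil =>
    simp [GetModelWeightsAndBiases, pvS_nil, PySem.List.enumerate_nil]
  | cons x xs ih =>
    rw [pvA_cons, ih x, pvS_cons]

-- the left half's last element is the carry index m-1
theorem pv_take_getLastD (ns : List Int) (m : Nat) (d : Int) (h1 : 1 ≤ m) (h2 : m ≤ ns.length) :
    (ns.take m).getLastD d = ns[m - 1]'(by omega) := by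
  obtain ⟨k, rfl⟩ : ∃ k, m = k + 1 := ⟨m - 1, by omega⟩
  have hk : k < ns.length := by omega
  rw [List.getLastD_eq_getLast?, List.getLast?_eq_getElem?]
  have hl : (ns.take (k + 1)).length = k + 1 := by simp; omega
  rw [hl]
  simp [hk]

-- equation lemmas for B's three branches
theorem pvAlt_nil (nI : Int) : GetModelWeightsAndBiases_alt nI [] = (0, 0, 0) := by
  rw [GetModelWeightsAndBiases_alt]
  simp

theorem pvAlt_one (nI x : Int) :
    GetModelWeightsAndBiases_alt nI [x] = (x + nI * x, nI * x, x) := by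
  rw [GetModelWeightsAndBiases_alt]
  simp

theorem pvAlt_big (nI : Int) (ns : List Int) (h : ¬ ns.length ≤ 1) :
    GetModelWeightsAndBiases_alt nI ns =
      ((GetModelWeightsAndBiases_alt nI (ns.take (ns.length / 2))).1 +
         (GetModelWeightsAndBiases_alt ((ns.take (ns.length / 2)).getLastD nI) (ns.drop (ns.length / 2))).1,
       (GetModelWeightsAndBiases_alt nI (ns.take (ns.length / 2))).2.1 +
         (GetModelWeightsAndBiases_alt ((ns.take (ns.length / 2)).getLastD nI) (ns.drop (ns.length / 2))).2.1,
       (GetModelWeightsAndBiases_alt nI (ns.take (ns.length / 2))).2.2 +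
         (GetModelWeightsAndBiases_alt ((ns.take (ns.length / 2)).getLastD nI) (ns.drop (ns.length / 2))).2.2) := by
  have hm1 : 1 ≤ ns.length / 2 := by omega
  have hm2 : ns.length / 2 ≤ ns.length := by omega
  have hcarry : PySem.List.pyGetD ns (((ns.length / 2 : Nat) : Int) - 1) 0
      = (ns.take (ns.length / 2)).getLastD nI := by
    have hc : (((ns.length / 2 : Nat) : Int) - 1) = ((ns.length / 2 - 1 : Nat) : Int) := by omega
    rw [hc, PySem.List.pyGetD_natCast, pv_take_getLastD ns (ns.length / 2) nI hm1 hm2]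
    simp [List.getD, List.getElem?_eq_getElem (show ns.length / 2 - 1 < ns.length by omega)]
  conv_lhs => rw [GetModelWeightsAndBiases_alt]
  simp only [dif_neg h, PySem.List.slice_to_natCast, PySem.List.slice_from_natCast, hcarry]

-- B equals the closed form
theorem pvB_aux : ∀ (n : Nat) (ns : List Int), ns.length ≤ n → ∀ (nI : Int),
    GetModelWeightsAndBiases_alt nI ns = pvS nI ns := by
  intro n
  induction n with
  | zero =>
    intro ns h nI
    have : ns = [] := List.eq_nil_of_length_eq_zero (by omega)
    subst this
    rw [pvAlt_nil, pvS_nil]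
  | succ n ih =>
    intro ns h nI
    by_cases h1 : ns.length ≤ 1
    · match ns with
      | [] => rw [pvAlt_nil, pvS_nil]
      | [x] =>
        rw [pvAlt_one, pvS_cons, pvS_nil]
        simp only [Prod.ext_iff]
        refine ⟨by ring, by ring, by ring⟩
      | _ :: _ :: _ => simp at h1
    · rw [pvAlt_big nI ns h1,
         ih (ns.take (ns.length / 2)) (by simp; omega) nI,
         ih (ns.drop (ns.length / 2)) (by simp; omega) _]
      have hsp := pvS_append (ns.take (ns.length / 2)) nI (ns.drop (ns.length / 2))
      rw [List.take_append_drop] at hsp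
      rw [hsp]

theorem pvB_eq_S (nInputs : Int) (ns : List Int) :
    GetModelWeightsAndBiases_alt nInputs ns = pvS nInputs ns :=
  pvB_aux ns.length ns le_rfl nInputs

theorem pvEq (nInputs : Int) (ns : List Int) :
    GetModelWeightsAndBiases nInputs ns = GetModelWeightsAndBiases_alt nInputs ns := by
  rw [pvA_eq_S, pvB_eq_S]

-- ===== VERDICT (by name: the statement is the Claim_ definition above) =====
theorem GetModelWeightsAndBiases_spec : Claim_equal_GetModelWeightsAndBiases := by
  intro nInputs ns _
  exact pvEq nInputs ns
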